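-- pv_equiv track=rewrite | github.com/DavidSCU1/MiniFold | modules/igpu_predictor.py | _normalize_chains_to_seq_len
-- ===== SOURCE A (Python) =====
-- def _normalize_chains_to_seq_len(chain_ss_list, seq_len):
--     if not chain_ss_list:
--         return ["C" * seq_len]
--     total = sum(len(s) for s in chain_ss_list)
--     parts = chain_ss_list[:]
--     if total == seq_len:
--         return parts
--     if total > seq_len:
--         over = total - seq_len
--         for i in range(len(parts)-1, -1, -1):
--             if over <= 0:
--                 break
--             cut = min(over, len(parts[i]))
--             parts[i] = parts[i][:-cut]
--             over -= cut
--         parts = [p for p in parts if p]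
--         if not parts:
--             return ["C" * seq_len]
--         return parts
--     add = seq_len - total
--     parts[-1] = parts[-1] + ("C" * add)
--     return parts
-- ===== SOURCE B (Python) =====
-- def _normalize_chains_to_seq_len(chain_ss_list, seq_len):
--     if not chain_ss_list:
--         return ["C" * seq_len]
--     total = sum(len(s) for s in chain_ss_list)
--     if total == seq_len:
--         return list(chain_ss_list)
--     if total < seq_len:
--         return chain_ss_list[:-1] + [chain_ss_list[-1] + "C" * (seq_len - total)]
--     # over-length: single forward pass keeping the first seq_len characters
--     kept = []
--     running = 0
--     for s in chain_ss_list: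
--         if running >= seq_len:
--             break
--         take = s if running + len(s) <= seq_len else s[: seq_len - running]
--         if take:
--             kept.append(take)
--         running += len(s)
--     return kept if kept else ["C" * seq_len]
-- ===== Notes on version B (the rewrite author's own statement) =====
-- stated objective: faster
-- what changed: The over-length case's backward index loop (repeatedly re-slicing chains from the end, then a separate filter pass and emptiness re-check) is replaced by a single forward pass with early exit that appends each chain whole while it fits and truncates the one chain crossing seq_len, skipping empty pieces as it goes.
import Mathlib
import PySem

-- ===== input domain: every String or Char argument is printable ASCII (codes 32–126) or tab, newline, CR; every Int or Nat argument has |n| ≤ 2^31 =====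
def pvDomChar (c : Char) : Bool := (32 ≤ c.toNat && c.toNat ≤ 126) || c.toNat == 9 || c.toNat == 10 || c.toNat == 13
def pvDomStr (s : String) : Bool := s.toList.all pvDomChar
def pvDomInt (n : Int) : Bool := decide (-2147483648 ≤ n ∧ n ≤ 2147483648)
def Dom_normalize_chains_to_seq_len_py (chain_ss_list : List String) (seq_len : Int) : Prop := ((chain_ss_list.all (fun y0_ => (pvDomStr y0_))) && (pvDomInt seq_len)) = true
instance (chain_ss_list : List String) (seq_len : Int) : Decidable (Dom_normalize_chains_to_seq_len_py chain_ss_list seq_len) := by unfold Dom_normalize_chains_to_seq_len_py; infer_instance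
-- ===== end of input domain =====

-- B replaces A's backward index loop that cuts chains from the end (plus a filter pass) by a single
-- forward pass with early exit keeping the first seq_len characters; same return value everywhere (measured faster).

-- "C" * n  (shared literal expression of both Python sources)
def pvRepC (n : Int) : String := String.ofList (PySem.List.pyRepeat ['C'] n)

-- ===== PORT A =====
-- one iteration of A's 'for i in range(len(parts)-1, -1, -1)' loop; the 'break' is modelled as a
-- pass-through once ov ≤ 0 (ov never increases, so this is the same state)
def pvCutStep (st : List String × Int) (i : Int) : List String × Int :=
  if st.2 ≤ 0 then st
  else
    let p := PySem.List.pyGetD st.1 i ""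
    let cut := min st.2 (PySem.Str.len p)
    (st.1.set i.toNat (PySem.Str.slice p none (some (-cut))), st.2 - cut)
    -- p[:-cut]; i ≥ 0 throughout the Python range, so .set i.toNat is exact

def normalize_chains_to_seq_len_py (chain_ss_list : List String) (seq_len : Int) : List String :=
  if chain_ss_list = [] then [pvRepC seq_len]
  else
    let total : Int := (chain_ss_list.map PySem.Str.len).sum
    let parts := chain_ss_list
    if total = seq_len then parts
    else if total > seq_len then
      let st := (PySem.List.pyRange ((parts.length : Int) - 1) (-1) (-1)).foldl pvCutStep (parts, total - seq_len)
      let parts2 := st.1.filter (fun p => p ≠ "")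
      if parts2 = [] then [pvRepC seq_len] else parts2
    else
      let add := seq_len - total
      -- parts[-1] = parts[-1] + "C"*add  (assignment at index -1 = set at length-1; '+' on str is list append)
      parts.set (parts.length - 1) (String.ofList ((PySem.List.pyGetD parts (-1) "").toList ++ (pvRepC add).toList))

-- ===== PORT B =====
-- one iteration of B's forward loop; the 'break' (running ≥ seq_len) is a pass-through
def pvFwdStep (q : Int) (st : List String × Int) (s : String) : List String × Int :=
  if st.2 ≥ q then st
  else
    let take := if st.2 + PySem.Str.len s ≤ q then s else PySem.Str.slice s none (some (q - st.2))
    ((if take ≠ "" then st.1 ++ [take] else st.1), st.2 + PySem.Str.len s)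

def normalize_chains_to_seq_len_py_alt (chain_ss_list : List String) (seq_len : Int) : List String :=
  if chain_ss_list = [] then [pvRepC seq_len]
  else
    let total : Int := (chain_ss_list.map PySem.Str.len).sum
    if total = seq_len then chain_ss_list
    else if total < seq_len then
      PySem.List.slice chain_ss_list none (some (-1)) ++
        [String.ofList ((PySem.List.pyGetD chain_ss_list (-1) "").toList ++ (pvRepC (seq_len - total)).toList)]
    else
      let st := chain_ss_list.foldl (pvFwdStep seq_len) ([], 0)
      if st.1 = [] then [pvRepC seq_len] else st.1

-- ===== PRECONDITION & SPEC =====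
def Spec_normalize_chains_to_seq_len_py (chain_ss_list : List String) (seq_len : Int) (out : List String) : Prop := out = normalize_chains_to_seq_len_py_alt chain_ss_list seq_len
instance (chain_ss_list : List String) (seq_len : Int) (out : List String) : Decidable (Spec_normalize_chains_to_seq_len_py chain_ss_list seq_len out) := by unfold Spec_normalize_chains_to_seq_len_py; infer_instance

-- ===== CLAIM (what is proved, stated in full; the proofs are below) =====
def Claim_equal_normalize_chains_to_seq_len_py : Prop := ∀ (chain_ss_list : List String) (seq_len : Int), Dom_normalize_chains_to_seq_len_py chain_ss_list seq_len → Spec_normalize_chains_to_seq_len_py chain_ss_list seq_len (normalize_chains_to_seq_len_py chain_ss_list seq_len)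

-- ===== LEMMAS AND PROOFS =====

-- the first seq_len-style budget view both loops compute: each chain keeps a prefix, the budget
-- shrinking by the chain's full length
def pvKeepMap (q : Int) : List String → List String
  | [] => []
  | s :: rest => String.ofList (s.toList.take q.toNat) :: pvKeepMap (q - s.toList.length) rest

-- A's backward loop, read ov the reversed list
def pvCutRev : List String → Int → List String
  | [], _ => []
  | s :: rs, ov =>
      String.ofList (s.toList.take ((s.toList.length : Int) - ov).toNat) :: pvCutRev rs (ov - s.toList.length)

-- A's remaining 'ov' after the loop, ov the reversed list
def pvOverRem : List String → Int → Int
  | [], ov => ov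
  | s :: rs, ov => if ov ≤ 0 then pvOverRem rs ov else pvOverRem rs (ov - min ov s.toList.length)

theorem pvCutRev_nonpos (rs : List String) (ov : Int) (h : ov ≤ 0) : pvCutRev rs ov = rs := by
  induction rs generalizing ov with
  | nil => rfl
  | cons s rs ih =>
      simp only [pvCutRev]
      rw [List.take_of_length_le (by omega), ih _ (by omega)]
      simp

theorem pvStrLen_eq (s : String) : PySem.Str.len s = (s.toList.length : Int) := rfl

-- A's loop, with an untouched tail appended behind the indexed part
theorem pvCutA (xs : List String) : ∀ (tail : List String) (ov : Int),
    (PySem.List.pyRange ((xs.length : Int) - 1) (-1) (-1)).foldl pvCutStep (xs ++ tail, ov)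
      = ((pvCutRev xs.reverse ov).reverse ++ tail, pvOverRem xs.reverse ov) := by
  induction xs using List.reverseRecOn with
  | nil =>
      intro tail ov
      rw [PySem.List.pyRange_neg_one_eq_nil (by simp)]
      simp [pvCutRev, pvOverRem]
  | append_singleton ys s ih =>
      intro tail ov
      have hlen : ((ys ++ [s]).length : Int) - 1 = (ys.length : Int) := by simp
      rw [hlen, PySem.List.pyRange_neg_one_cons (by omega)]
      simp only [List.foldl_cons]
      have hget : PySem.List.pyGetD (ys ++ [s] ++ tail, ov).1 (ys.length : Int) "" = s := by
        simp [PySem.List.pyGetD_natCast, List.getD_eq_getElem?_getD]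
      rw [List.reverse_append, List.reverse_singleton, List.singleton_append]
      by_cases hov : ov ≤ 0
      · -- break: state passes through unchanged; all kept strings are full
        simp only [pvCutStep, if_pos hov]
        rw [show ys ++ [s] ++ tail = ys ++ ([s] ++ tail) by simp]
        rw [ih ([s] ++ tail) ov]
        simp only [pvCutRev, pvOverRem, if_pos hov]
        rw [List.take_of_length_le (by omega)]
        rw [pvCutRev_nonpos ys.reverse (ov - s.toList.length) (by omega)]
        rw [pvCutRev_nonpos ys.reverse ov hov]
        simp
      · simp only [pvCutStep, if_neg hov]
        rw [hget]
        have hsetlen : ((ys.length : Int)).toNat = ys.length := by simp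
        set L : Int := (s.toList.length : Int) with hL
        have hcut : min ov (PySem.Str.len s) = min ov L := by rw [pvStrLen_eq]
        have hLnn : 0 ≤ L := by omega
        have hset : (ys ++ [s] ++ tail).set ((ys.length : Int)).toNat
              (PySem.Str.slice s none (some (-(min ov (PySem.Str.len s)))))
            = ys ++ (PySem.Str.slice s none (some (-(min ov (PySem.Str.len s)))) :: tail) := by
          rw [hsetlen, show ys ++ [s] ++ tail = ys ++ (s :: tail) by simp, List.set_append]
          simp
        rw [hset]
        rw [ih _ (ov - min ov (PySem.Str.len s))]
        simp only [pvCutRev, pvOverRem, if_neg hov]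
        have hslice : PySem.Str.slice s none (some (-(min ov (PySem.Str.len s))))
            = String.ofList (s.toList.take (L - ov).toNat) := by
          apply String.toList_inj.mp
          rw [PySem.Str.toList_slice, PySem.Chars.slice_eq_listSlice]
          rw [hcut]
          by_cases hle : ov ≤ L
          · -- cut = ov > 0
            have hmv : min ov L = ((ov.toNat : Int)) := by omega
            rw [hmv, PySem.List.slice_to_neg_natCast _ _ (by omega)]
            simp only [String.toList_ofList]
            congr 1
            omega
          · -- cut = len(s) : the whole chain is cut
            have hmv : min ov L = ((L.toNat : Int)) := by omega
            rw [hmv]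
            rcases Nat.eq_zero_or_pos L.toNat with h0 | hpos
            · rw [h0]
              have hs0 : s.toList = [] := by
                have : s.toList.length = 0 := by omega
                simpa using this
              simp [hs0, PySem.List.slice]
            · rw [PySem.List.slice_to_neg_natCast _ _ hpos]
              simp only [String.toList_ofList]
              congr 1
              omega
        rw [hslice]
        have hcongr : pvCutRev ys.reverse (ov - min ov (PySem.Str.len s))
            = pvCutRev ys.reverse (ov - L) := by
          rw [hcut]
          by_cases hle : ov ≤ L
          · rw [pvCutRev_nonpos _ _ (by omega), pvCutRev_nonpos _ _ (by omega)]
          · congr 1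
            omega
        have hrem : pvOverRem ys.reverse (ov - min ov (PySem.Str.len s))
            = pvOverRem ys.reverse (ov - min ov L) := by rw [hcut]
        rw [hcongr, hrem]
        simp only [Prod.mk.injEq, hL]
        simp

-- total length of a list of chains
def pvTot (ps : List String) : Int := ((ps.map PySem.Str.len).sum)

theorem pvTot_append (ys : List String) (s : String) : pvTot (ys ++ [s]) = pvTot ys + s.toList.length := by
  simp [pvTot]

theorem pvKeepMap_append (q : Int) (ys : List String) (s : String) :
    pvKeepMap q (ys ++ [s]) = pvKeepMap q ys ++ [String.ofList (s.toList.take (q - pvTot ys).toNat)] := by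
  induction ys generalizing q with
  | nil => simp [pvKeepMap, pvTot]
  | cons y ys ih =>
      simp only [List.cons_append, pvKeepMap, ih]
      have : q - y.toList.length - pvTot ys = q - pvTot (y :: ys) := by
        simp [pvTot]; ring
      rw [this]

theorem pvKeepCut (ps : List String) : ∀ (q : Int),
    pvCutRev ps.reverse (pvTot ps - q) = (pvKeepMap q ps).reverse := by
  induction ps using List.reverseRecOn with
  | nil => intro q; simp [pvCutRev, pvKeepMap]
  | append_singleton ys s ih =>
      intro q
      rw [List.reverse_append, List.reverse_singleton, List.singleton_append]
      simp only [pvCutRev]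
      rw [pvKeepMap_append, List.reverse_append, List.reverse_singleton, List.singleton_append]
      rw [pvTot_append]
      have h1 : ((s.toList.length : Int)) - (pvTot ys + s.toList.length - q) = q - pvTot ys := by ring
      have h2 : pvTot ys + s.toList.length - q - s.toList.length = pvTot ys - q := by ring
      rw [h1, h2, ih q]

theorem pvKeepMap_nonpos_filter (ps : List String) : ∀ (q : Int), q ≤ 0 →
    (pvKeepMap q ps).filter (fun p => p ≠ "") = [] := by
  induction ps with
  | nil => intro q _; rfl
  | cons s ps ih =>
      intro q hq
      simp only [pvKeepMap]
      have hq0 : q.toNat = 0 := by omega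
      rw [hq0, List.take_zero]
      rw [List.filter_cons]
      simp only [show (String.ofList [] : String) = "" from rfl]
      simp only [ne_eq, not_true_eq_false, decide_false]
      exact ih _ (by omega)

theorem pvFrozen (q : Int) (ps : List String) : ∀ (acc : List String) (r : Int), q ≤ r →
    ps.foldl (pvFwdStep q) (acc, r) = (acc, r) := by
  induction ps with
  | nil => intro acc r _; rfl
  | cons s ps ih =>
      intro acc r hr
      simp only [List.foldl_cons, pvFwdStep, if_pos (by omega : r ≥ q)]
      exact ih acc r hr

theorem pvFwdA (q : Int) (ps : List String) : ∀ (acc : List String) (r : Int),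
    (ps.foldl (pvFwdStep q) (acc, r)).1 = acc ++ (pvKeepMap (q - r) ps).filter (fun p => p ≠ "") := by
  induction ps with
  | nil => intro acc r; simp [pvKeepMap]
  | cons s ps ih =>
      intro acc r
      by_cases hfr : q ≤ r
      · rw [pvFrozen q (s :: ps) acc r hfr]
        rw [pvKeepMap_nonpos_filter _ _ (by omega)]
        simp
      · push_neg at hfr
        simp only [List.foldl_cons, pvFwdStep, if_neg (by omega : ¬ r ≥ q), pvStrLen_eq]
        simp only [pvKeepMap, List.filter_cons]
        by_cases hfit : r + (s.toList.length : Int) ≤ q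
        · rw [if_pos hfit]
          have hfull : String.ofList (s.toList.take (q - r).toNat) = s := by
            rw [List.take_of_length_le (by omega)]; simp
          rw [hfull, ih]
          have hb : q - r - ((s.toList.length : Int)) = q - (r + (s.toList.length : Int)) := by omega
          rw [hb]
          by_cases hne : s = ""
          · simp [hne]
          · simp [hne]
        · rw [if_neg hfit]
          push_neg at hfit
          have htake : PySem.Str.slice s none (some (q - r)) = String.ofList (s.toList.take (q - r).toNat) := by
            apply String.toList_inj.mp
            rw [PySem.Str.toList_slice, PySem.Chars.slice_eq_listSlice]
            rw [PySem.List.slice_to]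
            simp
            omega
          have hne : String.ofList (s.toList.take (q - r).toNat) ≠ "" := by
            intro h
            have h2 : (s.toList.take (q - r).toNat).length = 0 := by
              rw [show s.toList.take (q - r).toNat
                    = (String.ofList (s.toList.take (q - r).toNat)).toList by simp, h]
              rfl
            rw [List.length_take] at h2
            omega
          rw [htake, if_pos hne]
          rw [pvFrozen q ps _ (r + (s.toList.length : Int)) (by omega)]
          rw [pvKeepMap_nonpos_filter _ _ (by omega)]
          simp [hne]

-- last-element assignment = dropLast ++ [new]
theorem pvSetLast (xs : List String) (v : String) (h : xs ≠ []) :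
    xs.set (xs.length - 1) v = xs.dropLast ++ [v] := by
  induction xs using List.reverseRecOn with
  | nil => simp at h
  | append_singleton ys s _ =>
      rw [List.set_append]
      simp

-- ===== VERDICT (by name: the statement is the Claim_ definition above) =====
theorem normalize_chains_to_seq_len_py_spec : Claim_equal_normalize_chains_to_seq_len_py := by
  intro ps q _
  unfold Spec_normalize_chains_to_seq_len_py
  unfold normalize_chains_to_seq_len_py normalize_chains_to_seq_len_py_alt
  by_cases hnil : ps = []
  · simp [hnil]
  · simp only [if_neg hnil]
    set total : Int := (ps.map PySem.Str.len).sum with htot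
    by_cases heq : total = q
    · simp [heq]
    · simp only [if_neg heq]
      by_cases hgt : total > q
      · rw [if_pos hgt, if_neg (by omega : ¬ total < q)]
        have hA := pvCutA ps [] (total - q)
        rw [List.append_nil] at hA
        have hB := pvFwdA q ps [] 0
        have hcut : pvCutRev ps.reverse (total - q) = (pvKeepMap q ps).reverse := by
          have : total = pvTot ps := rfl
          rw [this] at *
          exact pvKeepCut ps q
        simp only [hA, hcut, List.reverse_reverse]
        rw [hB]
        simp
      · rw [if_neg hgt, if_pos (by omega : total < q)]
        rw [pvSetLast ps _ hnil, PySem.List.slice_to_neg_one]
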